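-- pv_equiv track=rewrite | github.com/arcstep/illufly-tts | src/illufly_tts/english_g2p.py | _character_to_phoneme
-- ===== SOURCE A (Python) =====
-- CONSONANT_MAP = {
--     'b': 'B',
--     'c': 'K',
--     'd': 'D',
--     'f': 'F',
--     'g': 'G',
--     'h': 'HH',
--     'j': 'JH',
--     'k': 'K',
--     'l': 'L',
--     'm': 'M',
--     'n': 'N',
--     'p': 'P',
--     'q': 'K W',
--     'r': 'R',
--     's': 'S',
--     't': 'T',
--     'v': 'V',
--     'w': 'W',
--     'x': 'K S',
--     'y': 'Y',
--     'z': 'Z',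
--     'ch': 'CH',
--     'sh': 'SH',
--     'th': 'TH',
--     'ph': 'F',
--     'wh': 'W',
--     'gh': 'G',
-- }
--
-- VOWEL_MAP = {
--     'a': 'AE',
--     'e': 'EH',
--     'i': 'IH',
--     'o': 'AA',
--     'u': 'AH',
--     'ai': 'EY',
--     'ay': 'EY',
--     'ee': 'IY',
--     'ea': 'IY',
--     'ie': 'IY',
--     'oo': 'UW',
--     'ou': 'AW',
--     'ow': 'AW',
--     'oi': 'OY',
--     'oy': 'OY',
--     'au': 'AO',
--     'aw': 'AO',
--     'ue': 'UW',
--     'ui': 'UW',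
-- }
--
-- def _character_to_phoneme(word):
--     """将单词按字符转换为音素"""
--     phonemes = []
--     i = 0
--
--     while i < len(word):
--         # 检查双字符辅音
--         if i < len(word) - 1 and word[i:i+2] in CONSONANT_MAP:
--             phonemes.append(CONSONANT_MAP[word[i:i+2]])
--             i += 2
--             continue
--
--         # 检查双字符元音
--         if i < len(word) - 1 and word[i:i+2] in VOWEL_MAP:
--             phonemes.append(VOWEL_MAP[word[i:i+2]])
--             i += 2
--             continue
--
--         # 检查单字符
--         if word[i] in CONSONANT_MAP:
--             phonemes.append(CONSONANT_MAP[word[i]])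
--         elif word[i] in VOWEL_MAP:
--             phonemes.append(VOWEL_MAP[word[i]])
--         else:
--             phonemes.append(word[i])
--
--         i += 1
--
--     return " ".join(phonemes)
-- ===== SOURCE B (Python) =====
-- CONSONANT_MAP = {
--     'b': 'B', 'c': 'K', 'd': 'D', 'f': 'F', 'g': 'G', 'h': 'HH', 'j': 'JH',
--     'k': 'K', 'l': 'L', 'm': 'M', 'n': 'N', 'p': 'P', 'q': 'K W', 'r': 'R',
--     's': 'S', 't': 'T', 'v': 'V', 'w': 'W', 'x': 'K S', 'y': 'Y', 'z': 'Z',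
--     'ch': 'CH', 'sh': 'SH', 'th': 'TH', 'ph': 'F', 'wh': 'W', 'gh': 'G',
-- }
--
-- VOWEL_MAP = {
--     'a': 'AE', 'e': 'EH', 'i': 'IH', 'o': 'AA', 'u': 'AH',
--     'ai': 'EY', 'ay': 'EY', 'ee': 'IY', 'ea': 'IY', 'ie': 'IY',
--     'oo': 'UW', 'ou': 'AW', 'ow': 'AW', 'oi': 'OY', 'oy': 'OY',
--     'au': 'AO', 'aw': 'AO', 'ue': 'UW', 'ui': 'UW',
-- }
--
-- # One merged phoneme map (consonants take priority, as in the original check order)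
-- # and the set of two-character graphemes, built once at module load.
-- _PHONEME_MAP = {**CONSONANT_MAP, **VOWEL_MAP}
-- _DIGRAPHS = {k for k in _PHONEME_MAP if len(k) == 2}
--
-- def _tokenize(word):
--     """Greedy maximal-munch split of word into digraphs and single characters."""
--     tokens = []
--     while word:
--         if word[:2] in _DIGRAPHS:
--             tokens.append(word[:2])
--             word = word[2:]
--         else:
--             tokens.append(word[0])
--             word = word[1:]
--     return tokens
--
-- def _character_to_phoneme(word):
--     """将单词按字符转换为音素"""
--     return " ".join(_PHONEME_MAP.get(t, t) for t in _tokenize(word))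
-- ===== Notes on version B (the rewrite author's own statement) =====
-- stated objective: idiomatic
-- what changed: Replaced the index-bookkeeping while loop that cascades through two dict memberships at each position by a two-phase pipeline: a greedy tokenizer that splits the word into digraphs (a precomputed key set) and single characters, followed by one lookup per token in a single merged phoneme map, joined at the end.
import Mathlib
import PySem

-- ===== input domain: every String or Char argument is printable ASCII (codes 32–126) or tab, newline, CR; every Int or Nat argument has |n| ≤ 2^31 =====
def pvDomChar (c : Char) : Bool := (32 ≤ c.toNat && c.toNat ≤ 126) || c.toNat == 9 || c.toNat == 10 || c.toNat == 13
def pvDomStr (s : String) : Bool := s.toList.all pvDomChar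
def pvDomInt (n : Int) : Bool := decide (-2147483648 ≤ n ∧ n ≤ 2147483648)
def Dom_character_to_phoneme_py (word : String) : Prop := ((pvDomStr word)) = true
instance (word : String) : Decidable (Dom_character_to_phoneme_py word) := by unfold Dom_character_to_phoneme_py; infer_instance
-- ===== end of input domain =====

-- B replaces A's index-while loop (two dict-membership cascades per position) by a two-phase
-- pipeline: a greedy digraph/char tokenizer over a precomputed digraph set, then one lookup
-- per token in a single merged phoneme map; same behaviour, proved equal on all inputs.


set_option maxRecDepth 10000

-- ===== PORT A =====
-- module constant CONSONANT_MAP (shared by both sources)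
def pyConsMap : PySem.Dict String String := PySem.Dict.ofList
  [("b","B"),("c","K"),("d","D"),("f","F"),("g","G"),("h","HH"),("j","JH"),
   ("k","K"),("l","L"),("m","M"),("n","N"),("p","P"),("q","K W"),("r","R"),
   ("s","S"),("t","T"),("v","V"),("w","W"),("x","K S"),("y","Y"),("z","Z"),
   ("ch","CH"),("sh","SH"),("th","TH"),("ph","F"),("wh","W"),("gh","G")]

-- module constant VOWEL_MAP (shared by both sources)
def pyVowelMap : PySem.Dict String String := PySem.Dict.ofList
  [("a","AE"),("e","EH"),("i","IH"),("o","AA"),("u","AH"),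
   ("ai","EY"),("ay","EY"),("ee","IY"),("ea","IY"),("ie","IY"),
   ("oo","UW"),("ou","AW"),("ow","AW"),("oi","OY"),("oy","OY"),
   ("au","AO"),("aw","AO"),("ue","UW"),("ui","UW")]

-- A's single-character tail: CONSONANT_MAP / VOWEL_MAP membership cascade, else the char itself.
-- d[k] after a successful 'k in d' test is ported as getD with an unreachable "" default.
def pyAOne (c : Char) : String :=
  if PySem.Dict.contains pyConsMap (String.ofList [c]) then
    PySem.Dict.getD pyConsMap (String.ofList [c]) ""
  else if PySem.Dict.contains pyVowelMap (String.ofList [c]) then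
    PySem.Dict.getD pyVowelMap (String.ofList [c]) ""
  else String.ofList [c]

-- A's while loop over index i: 'i < len(word) - 1' (two chars left) is the c1 :: c2 :: rest
-- pattern, word[i:i+2] is String.ofList [c1, c2]; phonemes.append(…) is acc ++ […].
def pyALoop : List Char → List String → List String
  | [], acc => acc
  | [c], acc => acc ++ [pyAOne c]
  | c1 :: c2 :: rest, acc =>
    if PySem.Dict.contains pyConsMap (String.ofList [c1, c2]) then
      pyALoop rest (acc ++ [PySem.Dict.getD pyConsMap (String.ofList [c1, c2]) ""])
    else if PySem.Dict.contains pyVowelMap (String.ofList [c1, c2]) then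
      pyALoop rest (acc ++ [PySem.Dict.getD pyVowelMap (String.ofList [c1, c2]) ""])
    else
      pyALoop (c2 :: rest) (acc ++ [pyAOne c1])

def character_to_phoneme_py (word : String) : String :=
  PySem.Str.join " " (pyALoop word.toList [])

-- ===== PORT B =====
-- _PHONEME_MAP = {**CONSONANT_MAP, **VOWEL_MAP}
def pyPhonemeMap : PySem.Dict String String :=
  PySem.Dict.update pyConsMap (PySem.Dict.items pyVowelMap)

-- _DIGRAPHS = {k for k in _PHONEME_MAP if len(k) == 2}
def pyDigraphs : PySem.Set String :=
  PySem.Set.ofList ((PySem.Dict.keys pyPhonemeMap).filter (fun k => PySem.Str.len k == 2))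

-- _tokenize: 'while word:'; word[:2] is the first one or two chars, word[2:]/word[1:] the tails.
def pyBTok : List Char → List String
  | [] => []
  | [c] =>                               -- word[:2] of a 1-char word is that word itself
    if PySem.Set.contains pyDigraphs (String.ofList [c]) then
      String.ofList [c] :: pyBTok []
    else String.ofList [c] :: pyBTok []
  | c1 :: c2 :: rest =>
    if PySem.Set.contains pyDigraphs (String.ofList [c1, c2]) then
      String.ofList [c1, c2] :: pyBTok rest
    else String.ofList [c1] :: pyBTok (c2 :: rest)

def character_to_phoneme_py_alt (word : String) : String :=
  PySem.Str.join " "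
    ((pyBTok word.toList).map (fun t => PySem.Dict.getD pyPhonemeMap t t))

-- ===== PRECONDITION & SPEC =====
def Spec_character_to_phoneme_py (word : String) (out : String) : Prop := out = character_to_phoneme_py_alt word
instance (word : String) (out : String) : Decidable (Spec_character_to_phoneme_py word out) := by unfold Spec_character_to_phoneme_py; infer_instance

-- ===== CLAIM (what is proved, stated in full; the proofs are below) =====
def Claim_equal_character_to_phoneme_py : Prop := ∀ (word : String), Dom_character_to_phoneme_py word → Spec_character_to_phoneme_py word (character_to_phoneme_py word)

-- ===== LEMMAS AND PROOFS =====

-- the literal dicts and the digraph set, evaluated once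
theorem consMap_eq : pyConsMap = PySem.Dict.mk
    [("b","B"),("c","K"),("d","D"),("f","F"),("g","G"),("h","HH"),("j","JH"),
     ("k","K"),("l","L"),("m","M"),("n","N"),("p","P"),("q","K W"),("r","R"),
     ("s","S"),("t","T"),("v","V"),("w","W"),("x","K S"),("y","Y"),("z","Z"),
     ("ch","CH"),("sh","SH"),("th","TH"),("ph","F"),("wh","W"),("gh","G")] := by decide

theorem vowelMap_eq : pyVowelMap = PySem.Dict.mk
    [("a","AE"),("e","EH"),("i","IH"),("o","AA"),("u","AH"),
     ("ai","EY"),("ay","EY"),("ee","IY"),("ea","IY"),("ie","IY"),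
     ("oo","UW"),("ou","AW"),("ow","AW"),("oi","OY"),("oy","OY"),
     ("au","AO"),("aw","AO"),("ue","UW"),("ui","UW")] := by decide

theorem digraphs_eq : pyDigraphs =
    ["ch","sh","th","ph","wh","gh","ai","ay","ee","ea","ie",
     "oo","ou","ow","oi","oy","au","aw","ue","ui"] := by decide

-- the merged dict is the concatenation of the two item lists (their key sets are disjoint)
theorem phonemeMap_eq : pyPhonemeMap = PySem.Dict.mk (pyConsMap.items ++ pyVowelMap.items) := by decide

theorem get?_mk_append (l1 l2 : List (String × String)) (k : String) :
    (PySem.Dict.mk (l1 ++ l2)).get? k = ((PySem.Dict.mk l1).get? k).or ((PySem.Dict.mk l2).get? k) := by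
  simp [PySem.Dict.get?, List.find?_append, Option.map_or]

theorem get?_phoneme (k : String) :
    pyPhonemeMap.get? k = (pyConsMap.get? k).or (pyVowelMap.get? k) := by
  rw [phonemeMap_eq]
  exact get?_mk_append _ _ k

-- no single character is a digraph key
theorem digraphs_one (c : Char) :
    PySem.Set.contains pyDigraphs (String.ofList [c]) = false := by
  simp [digraphs_eq, PySem.Set.contains, ← String.toList_inj]

-- B's digraph test agrees with A's pair of two-character dict-membership tests
theorem digraphs_two (c1 c2 : Char) :
    PySem.Set.contains pyDigraphs (String.ofList [c1, c2]) =
      (PySem.Dict.contains pyConsMap (String.ofList [c1, c2]) ||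
       PySem.Dict.contains pyVowelMap (String.ofList [c1, c2])) := by
  rw [digraphs_eq, consMap_eq, vowelMap_eq]
  simp [PySem.Set.contains, PySem.Dict.contains_mk, ← String.toList_inj, Bool.beq_eq_decide_eq]
  simp only [@eq_comm Char _ c1, @eq_comm Char _ c2]
  ac_rfl

-- merged-map lookups agree with A's cascades
theorem phoneme_of_cons {s : String} (h : PySem.Dict.contains pyConsMap s = true) :
    PySem.Dict.getD pyPhonemeMap s s = PySem.Dict.getD pyConsMap s "" := by
  rw [PySem.Dict.contains_eq_isSome_get?] at h
  obtain ⟨v, hv⟩ := Option.isSome_iff_exists.mp h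
  rw [PySem.Dict.getD_eq_get?_getD, get?_phoneme, hv]
  simp [Option.or, PySem.Dict.getD_eq_get?_getD, hv]

theorem phoneme_of_vowel {s : String} (hc : PySem.Dict.contains pyConsMap s = false)
    (h : PySem.Dict.contains pyVowelMap s = true) :
    PySem.Dict.getD pyPhonemeMap s s = PySem.Dict.getD pyVowelMap s "" := by
  rw [PySem.Dict.contains_eq_isSome_get?] at hc h
  obtain ⟨v, hv⟩ := Option.isSome_iff_exists.mp h
  have hn : pyConsMap.get? s = none := Option.not_isSome_iff_eq_none.mp (by simp [hc])
  rw [PySem.Dict.getD_eq_get?_getD, get?_phoneme, hv, hn]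
  simp [Option.or, PySem.Dict.getD_eq_get?_getD, hv]

theorem phoneme_one (c : Char) :
    PySem.Dict.getD pyPhonemeMap (String.ofList [c]) (String.ofList [c]) = pyAOne c := by
  unfold pyAOne
  cases hc : PySem.Dict.contains pyConsMap (String.ofList [c]) with
  | true => rw [if_pos rfl]; exact phoneme_of_cons hc
  | false =>
    rw [if_neg (by simp)]
    cases hv : PySem.Dict.contains pyVowelMap (String.ofList [c]) with
    | true =>
      rw [if_pos rfl]
      exact phoneme_of_vowel hc hv
    | false =>
      rw [if_neg (by simp)]
      rw [PySem.Dict.contains_eq_isSome_get?] at hc hv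
      rw [PySem.Dict.getD_eq_get?_getD, get?_phoneme]
      cases hg : pyConsMap.get? (String.ofList [c]) with
      | some w => rw [hg] at hc; simp at hc
      | none =>
        cases hg' : pyVowelMap.get? (String.ofList [c]) with
        | some w => rw [hg'] at hv; simp at hv
        | none => rfl

-- the main loop invariant: A's accumulator loop produces exactly B's mapped token list
theorem loop_eq_tok : ∀ (cs : List Char) (acc : List String),
    pyALoop cs acc = acc ++ (pyBTok cs).map (fun t => PySem.Dict.getD pyPhonemeMap t t) := by
  intro cs
  induction cs using pyBTok.induct with
  | case1 => intro acc; simp [pyALoop, pyBTok]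
  | case2 c h => exact absurd h (by rw [digraphs_one]; simp)
  | case3 c _ =>
    intro acc
    simp [pyALoop, pyBTok, phoneme_one]
  | case4 c1 c2 rest h ih =>
    intro acc
    have h2 : (PySem.Dict.contains pyConsMap (String.ofList [c1, c2]) ||
        PySem.Dict.contains pyVowelMap (String.ofList [c1, c2])) = true := by
      rw [← digraphs_two]; exact h
    cases hc : PySem.Dict.contains pyConsMap (String.ofList [c1, c2]) with
    | true =>
      simp only [pyALoop, pyBTok, h, hc, if_true, List.map]
      rw [ih, phoneme_of_cons hc]
      simp
    | false =>
      have hv : PySem.Dict.contains pyVowelMap (String.ofList [c1, c2]) = true := by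
        rw [hc] at h2; simpa using h2
      simp only [pyALoop, pyBTok, h, hc, hv, if_true, if_false, Bool.false_eq_true, List.map]
      rw [ih, phoneme_of_vowel hc hv]
      simp
  | case5 c1 c2 rest h ih =>
    intro acc
    have h2 : (PySem.Dict.contains pyConsMap (String.ofList [c1, c2]) ||
        PySem.Dict.contains pyVowelMap (String.ofList [c1, c2])) = false := by
      rw [← digraphs_two]; simpa using h
    have hc : PySem.Dict.contains pyConsMap (String.ofList [c1, c2]) = false := by
      cases hx : PySem.Dict.contains pyConsMap (String.ofList [c1, c2]) <;> simp_all
    have hv : PySem.Dict.contains pyVowelMap (String.ofList [c1, c2]) = false := by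
      cases hx : PySem.Dict.contains pyVowelMap (String.ofList [c1, c2]) <;> simp_all
    simp only [pyALoop, pyBTok, hc, hv, if_false, Bool.false_eq_true, List.map,
      (by simpa using h : PySem.Set.contains pyDigraphs (String.ofList [c1, c2]) = false)]
    rw [ih, phoneme_one]
    simp

-- ===== VERDICT (by name: the statement is the Claim_ definition above) =====
theorem character_to_phoneme_py_spec : Claim_equal_character_to_phoneme_py := by
  intro word _
  unfold Spec_character_to_phoneme_py character_to_phoneme_py character_to_phoneme_py_alt
  rw [loop_eq_tok]
  rfl
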